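-- pv_equiv track=rewrite | github.com/jiekaitao/SeniorProject | RNAformer/build_bprna_dataset.py | dot_bracket_to_pairs
-- ===== SOURCE A (Python) =====
-- def dot_bracket_to_pairs(structure: str):
--     """Convert dot-bracket notation to pos1id/pos2id lists.
--
--     Handles standard brackets (), [], {}, <> for pseudoknots.
--     Returns two lists: pos1id (opening indices), pos2id (closing indices).
--     """
--     bracket_pairs = {'(': ')', '[': ']', '{': '}', '<': '>'}
--     close_to_open = {v: k for k, v in bracket_pairs.items()}
--
--     stacks = {k: [] for k in bracket_pairs}
--     pos1id = []
--     pos2id = []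
--
--     for i, ch in enumerate(structure):
--         if ch in bracket_pairs:
--             stacks[ch].append(i)
--         elif ch in close_to_open:
--             opener = close_to_open[ch]
--             if stacks[opener]:
--                 j = stacks[opener].pop()
--                 pos1id.append(j)
--                 pos2id.append(i)
--         # '.' and other characters are unpaired
--
--     # Sort by pos1id for consistency
--     if pos1id:
--         pairs = sorted(zip(pos1id, pos2id))
--         pos1id = [p[0] for p in pairs]
--         pos2id = [p[1] for p in pairs]
--
--     return pos1id, pos2id
-- ===== SOURCE B (Python) =====
-- def dot_bracket_to_pairs(structure: str):
--     """Same per-type stack matching, but pairs are stored in a position-indexed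
--     dict (opener -> closer) and emitted by one forward sweep over the positions,
--     so no sort is needed."""
--     bracket_pairs = {'(': ')', '[': ']', '{': '}', '<': '>'}
--     close_to_open = {v: k for k, v in bracket_pairs.items()}
--
--     stacks = {k: [] for k in bracket_pairs}
--     match = {}
--
--     for i, ch in enumerate(structure):
--         if ch in bracket_pairs:
--             stacks[ch].append(i)
--         elif ch in close_to_open:
--             s = stacks[close_to_open[ch]]
--             if s:
--                 match[s.pop()] = i
--
--     pos1id = []
--     pos2id = []
--     for j in range(len(structure)):
--         if j in match:
--             pos1id.append(j)
--             pos2id.append(match[j])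
--     return pos1id, pos2id
-- ===== Notes on version B (the rewrite author's own statement) =====
-- stated objective: alternative
-- what changed: Matched pairs go into a position-indexed dict (opener index -> closer index) and are emitted by one forward sweep over positions in ascending opener order, replacing A's pair-list accumulation followed by sorted(zip(...)).
import Mathlib
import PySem

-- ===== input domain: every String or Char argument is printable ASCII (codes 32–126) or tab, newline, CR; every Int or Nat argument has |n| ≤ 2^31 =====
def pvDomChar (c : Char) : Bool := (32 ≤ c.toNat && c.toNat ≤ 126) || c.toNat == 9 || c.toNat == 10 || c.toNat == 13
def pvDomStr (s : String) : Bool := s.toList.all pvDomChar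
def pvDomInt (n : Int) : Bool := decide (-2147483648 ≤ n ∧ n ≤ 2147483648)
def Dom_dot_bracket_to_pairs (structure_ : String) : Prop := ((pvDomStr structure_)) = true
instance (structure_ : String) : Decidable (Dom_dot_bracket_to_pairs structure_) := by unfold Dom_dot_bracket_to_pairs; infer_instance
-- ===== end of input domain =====

-- B stores each matched pair in a position-indexed dict (opener -> closer) and emits pairs by
-- one forward sweep over positions, replacing A's pair-list accumulation + sorted(zip(...)).


-- ===== PORT A =====
-- bracket_pairs = {'(': ')', '[': ']', '{': '}', '<': '>'}
def pvBracketPairs : PySem.Dict Char Char :=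
  PySem.Dict.ofList [('(', ')'), ('[', ']'), ('{', '}'), ('<', '>')]
-- close_to_open = {v: k for k, v in bracket_pairs.items()}
def pvCloseToOpen : PySem.Dict Char Char :=
  PySem.Dict.ofList (pvBracketPairs.items.map (fun p => (p.2, p.1)))
-- stacks = {k: [] for k in bracket_pairs}
def pvInitStacks : PySem.Dict Char (List Int) :=
  PySem.Dict.ofList (pvBracketPairs.keys.map (fun k => (k, ([] : List Int))))

-- the body of A's 'for i, ch in enumerate(structure)' loop; state = (stacks, pos1id, pos2id)
def dbpStepA (acc : PySem.Dict Char (List Int) × List Int × List Int) (p : Int × Char) :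
    PySem.Dict Char (List Int) × List Int × List Int :=
  if pvBracketPairs.contains p.2 then
    (acc.1.modify p.2 [] (fun s => s ++ [p.1]), acc.2.1, acc.2.2)   -- stacks[ch].append(i)
  else if pvCloseToOpen.contains p.2 then
    let opener := pvCloseToOpen.getD p.2 p.2  -- close_to_open[ch]: exact, the contains guard holds
    let s := acc.1.getD opener []             -- stacks[opener]: opener is one of the four fixed keys
    if h : s = [] then acc
    else  -- j = stacks[opener].pop(): last element; remaining stack is dropLast (exact)
      (acc.1.insert opener s.dropLast, acc.2.1 ++ [s.getLast h], acc.2.2 ++ [p.1])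
  else acc

def dot_bracket_to_pairs (structure_ : String) : List Int × List Int :=
  let r := (PySem.List.enumerate structure_.toList).foldl dbpStepA (pvInitStacks, [], [])
  let pos1id := r.2.1
  let pos2id := r.2.2
  if pos1id ≠ [] then
    -- pairs = sorted(zip(pos1id, pos2id)): tuples compare lexicographically -> sorted2 fst snd
    let pairs := PySem.List.sorted2 (pos1id.zip pos2id) Prod.fst Prod.snd
    (pairs.map Prod.fst, pairs.map Prod.snd)
  else (pos1id, pos2id)

-- ===== PORT B =====
-- the body of B's scan loop; state = (stacks, match); match[s.pop()] = i
def dbpStepB (acc : PySem.Dict Char (List Int) × PySem.Dict Int Int) (p : Int × Char) :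
    PySem.Dict Char (List Int) × PySem.Dict Int Int :=
  if pvBracketPairs.contains p.2 then
    (acc.1.modify p.2 [] (fun s => s ++ [p.1]), acc.2)
  else if pvCloseToOpen.contains p.2 then
    let s := acc.1.getD (pvCloseToOpen.getD p.2 p.2) []
    if h : s = [] then acc
    else (acc.1.insert (pvCloseToOpen.getD p.2 p.2) s.dropLast, acc.2.insert (s.getLast h) p.1)
  else acc

def dot_bracket_to_pairs_alt (structure_ : String) : List Int × List Int :=
  let r := (PySem.List.enumerate structure_.toList).foldl dbpStepB (pvInitStacks, PySem.Dict.empty)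
  -- forward sweep: for j in range(len(structure)): if j in match: append j / match[j]
  (PySem.List.pyRange 0 (PySem.Str.len structure_)).foldl
    (fun acc j => if r.2.contains j then (acc.1 ++ [j], acc.2 ++ [r.2.getD j 0]) else acc)
    ([], [])

-- ===== PRECONDITION & SPEC =====
def Spec_dot_bracket_to_pairs (structure_ : String) (out : List Int × List Int) : Prop := out = dot_bracket_to_pairs_alt structure_
instance (structure_ : String) (out : List Int × List Int) : Decidable (Spec_dot_bracket_to_pairs structure_ out) := by unfold Spec_dot_bracket_to_pairs; infer_instance

-- ===== CLAIM (what is proved, stated in full; the proofs are below) =====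
def Claim_equal_dot_bracket_to_pairs : Prop := ∀ (structure_ : String), Dom_dot_bracket_to_pairs structure_ → Spec_dot_bracket_to_pairs structure_ (dot_bracket_to_pairs structure_)

-- ===== LEMMAS AND PROOFS =====

-- all opener indices currently waiting on the four stacks
def pvPool (st : PySem.Dict Char (List Int)) : List Int :=
  st.getD '(' [] ++ st.getD '[' [] ++ st.getD '{' [] ++ st.getD '<' []

theorem bp_cases (ch : Char) (h : pvBracketPairs.contains ch = true) :
    ch = '(' ∨ ch = '[' ∨ ch = '{' ∨ ch = '<' := by
  rw [show pvBracketPairs = PySem.Dict.mk [('(', ')'), ('[', ']'), ('{', '}'), ('<', '>')] from rfl,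
      PySem.Dict.contains_mk] at h
  simp at h; tauto

theorem cl_cases (ch : Char) (h : pvCloseToOpen.contains ch = true) :
    ch = ')' ∨ ch = ']' ∨ ch = '}' ∨ ch = '>' := by
  rw [show pvCloseToOpen = PySem.Dict.mk [(')', '('), (']', '['), ('}', '{'), ('>', '<')] from rfl,
      PySem.Dict.contains_mk] at h
  simp at h; tauto


theorem pvInv_close (st : PySem.Dict Char (List Int)) (p1 p2 : List Int) (m : PySem.Dict Int Int)
    (b i : Int) (o : Char) (U V : List Int)
    (hpool : pvPool st = U ++ st.getD o [] ++ V)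
    (hins : ∀ l, pvPool (st.insert o l) = U ++ l ++ V)
    (hs : st.getD o [] ≠ [])
    (hitems : m.items = p1.zip p2) (hlen : p1.length = p2.length)
    (hnd : (m.keys ++ pvPool st).Nodup)
    (hbd : ∀ x ∈ m.keys ++ pvPool st, 0 ≤ x ∧ x < b) (hbi : b ≤ i) :
    (m.insert ((st.getD o []).getLast hs) i).items =
      (p1 ++ [(st.getD o []).getLast hs]).zip (p2 ++ [i]) ∧
    (p1 ++ [(st.getD o []).getLast hs]).length = (p2 ++ [i]).length ∧
    ((m.insert ((st.getD o []).getLast hs) i).keys ++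
      pvPool (st.insert o (st.getD o []).dropLast)).Nodup ∧
    (∀ x ∈ (m.insert ((st.getD o []).getLast hs) i).keys ++
      pvPool (st.insert o (st.getD o []).dropLast), 0 ≤ x ∧ x < i + 1) := by
  have hj : (st.getD o []).getLast hs ∈ pvPool st := by
    rw [hpool]
    exact List.mem_append.mpr (Or.inl (List.mem_append.mpr (Or.inr (List.getLast_mem hs))))
  have hjk : (st.getD o []).getLast hs ∉ m.keys := by
    intro hk
    rcases List.nodup_append.mp hnd with ⟨-, -, hdisj⟩
    exact hdisj _ hk _ hj rfl
  have hcont : m.contains ((st.getD o []).getLast hs) = false := by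
    rw [PySem.Dict.contains_eq_decide_mem_keys]
    simp [hjk]
  have hperm : ((m.insert ((st.getD o []).getLast hs) i).keys ++
      pvPool (st.insert o (st.getD o []).dropLast)).Perm (m.keys ++ pvPool st) := by
    rw [PySem.Dict.keys_insert_of_not_contains m i hcont, hins, hpool]
    have key : st.getD o [] = (st.getD o []).dropLast ++ [(st.getD o []).getLast hs] :=
      (List.dropLast_append_getLast hs).symm
    refine List.perm_iff_count.mpr (fun a => ?_)
    conv_rhs => rw [key]
    by_cases hag : a = (st.getD o []).getLast hs <;>
      simp [List.count_append, List.count_cons, hag] <;> omega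
  refine ⟨?_, by simp [hlen], hperm.nodup_iff.mpr hnd, fun x hx => ?_⟩
  · rw [PySem.Dict.items_insert_of_not_contains m i hcont, hitems, List.zip_append hlen]
    rfl
  · have := hbd x (hperm.mem_iff.mp hx)
    omega

theorem dbp_scan (L : List (Int × Char)) :
    ∀ (st : PySem.Dict Char (List Int)) (p1 p2 : List Int) (m : PySem.Dict Int Int) (bnd B : Int),
    List.Pairwise (fun p q : Int × Char => p.1 < q.1) L →
    (∀ p ∈ L, bnd ≤ p.1 ∧ p.1 < B) →
    0 ≤ bnd → bnd ≤ B →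
    m.items = p1.zip p2 →
    p1.length = p2.length →
    (m.keys ++ pvPool st).Nodup →
    (∀ x ∈ m.keys ++ pvPool st, 0 ≤ x ∧ x < bnd) →
    (L.foldl dbpStepB (st, m)).2.items =
      (L.foldl dbpStepA (st, p1, p2)).2.1.zip (L.foldl dbpStepA (st, p1, p2)).2.2 ∧
    (L.foldl dbpStepA (st, p1, p2)).2.1.length = (L.foldl dbpStepA (st, p1, p2)).2.2.length ∧
    ((L.foldl dbpStepB (st, m)).2.keys ++ pvPool (L.foldl dbpStepB (st, m)).1).Nodup ∧
    (∀ x ∈ (L.foldl dbpStepB (st, m)).2.keys ++ pvPool (L.foldl dbpStepB (st, m)).1,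
      0 ≤ x ∧ x < B) := by
  induction L with
  | nil =>
    intro st p1 p2 m bnd B _ _ _ hbB hitems hlen hnd hbd
    simp only [List.foldl_nil]
    exact ⟨hitems, hlen, hnd, fun x hx => ⟨(hbd x hx).1, lt_of_lt_of_le (hbd x hx).2 hbB⟩⟩
  | cons p T ih =>
    intro st p1 p2 m bnd B hpw hmem h0 hbB hitems hlen hnd hbd
    obtain ⟨i, ch⟩ := p
    obtain ⟨hbi, hiB⟩ := hmem _ (List.mem_cons_self)
    have hpw' := (List.pairwise_cons.mp hpw).2
    have hT : ∀ q ∈ T, i < q.1 := (List.pairwise_cons.mp hpw).1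
    have hmem' : ∀ q ∈ T, i + 1 ≤ q.1 ∧ q.1 < B := fun q hq =>
      ⟨by have := hT q hq; omega, (hmem q (List.mem_cons_of_mem _ hq)).2⟩
    simp only [List.foldl_cons]
    by_cases hop : pvBracketPairs.contains ch = true
    · -- opening bracket
      have hstA : dbpStepA (st, p1, p2) (i, ch) =
          (st.modify ch [] (fun s => s ++ [i]), p1, p2) := by simp [dbpStepA, hop]
      have hstB : dbpStepB (st, m) (i, ch) =
          (st.modify ch [] (fun s => s ++ [i]), m) := by simp [dbpStepB, hop]
      rw [hstA, hstB]
      have hperm : (m.keys ++ pvPool (st.modify ch [] (fun s => s ++ [i]))).Perm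
          ((m.keys ++ pvPool st) ++ [i]) := by
        rcases bp_cases ch hop with h | h | h | h <;> subst h <;>
        · refine List.perm_iff_count.mpr (fun a => ?_)
          simp [pvPool, List.count_append, PySem.Dict.getD_modify, List.count_cons]
          try omega
      refine ih _ p1 p2 m (i + 1) B hpw' hmem' (by omega) (by omega) hitems hlen ?_ ?_
      · refine hperm.nodup_iff.mpr ?_
        rw [List.nodup_append]
        refine ⟨hnd, List.nodup_singleton i, ?_⟩
        intro x hx y hy
        have hb := (hbd x hx).2
        have : y = i := by simpa using hy
        omega
      · intro x hx
        rcases List.mem_append.mp (hperm.mem_iff.mp hx) with hx' | hx'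
        · have := hbd x hx'; omega
        · have : x = i := by simpa using hx'
          omega
    · by_cases hcl : pvCloseToOpen.contains ch = true
      · rcases cl_cases ch hcl with h | h | h | h <;> subst h
        · have hopener : pvCloseToOpen.getD ')' ')' = '(' := by decide
          by_cases hs : st.getD '(' [] = []
          · have hstA : dbpStepA (st, p1, p2) (i, ')') = (st, p1, p2) := by
              simp [dbpStepA, hop, hcl, hopener, hs]
            have hstB : dbpStepB (st, m) (i, ')') = (st, m) := by
              simp [dbpStepB, hop, hcl, hopener, hs]
            rw [hstA, hstB]
            exact ih st p1 p2 m (i + 1) B hpw' hmem' (by omega) (by omega) hitems hlen hnd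
              (fun x hx => ⟨(hbd x hx).1, by have := (hbd x hx).2; omega⟩)
          · have hstA : dbpStepA (st, p1, p2) (i, ')') =
                (st.insert '(' (st.getD '(' []).dropLast,
                 p1 ++ [(st.getD '(' []).getLast hs], p2 ++ [i]) := by
              simp [dbpStepA, hop, hcl, hopener, hs]
            have hstB : dbpStepB (st, m) (i, ')') =
                (st.insert '(' (st.getD '(' []).dropLast,
                 m.insert ((st.getD '(' []).getLast hs) i) := by
              simp [dbpStepB, hop, hcl, hopener, hs]
            rw [hstA, hstB]
            obtain ⟨h1, h2, h3, h4⟩ := pvInv_close st p1 p2 m bnd i '('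
              (([] : List Int)) (st.getD '[' [] ++ st.getD '{' [] ++ st.getD '<' [])
              (by simp [pvPool]) (fun l => by simp [pvPool, PySem.Dict.getD_insert]) hs
              hitems hlen hnd hbd hbi
            exact ih _ _ _ _ (i + 1) B hpw' hmem' (by omega) (by omega) h1 h2 h3 h4
        · have hopener : pvCloseToOpen.getD ']' ']' = '[' := by decide
          by_cases hs : st.getD '[' [] = []
          · have hstA : dbpStepA (st, p1, p2) (i, ']') = (st, p1, p2) := by
              simp [dbpStepA, hop, hcl, hopener, hs]
            have hstB : dbpStepB (st, m) (i, ']') = (st, m) := by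
              simp [dbpStepB, hop, hcl, hopener, hs]
            rw [hstA, hstB]
            exact ih st p1 p2 m (i + 1) B hpw' hmem' (by omega) (by omega) hitems hlen hnd
              (fun x hx => ⟨(hbd x hx).1, by have := (hbd x hx).2; omega⟩)
          · have hstA : dbpStepA (st, p1, p2) (i, ']') =
                (st.insert '[' (st.getD '[' []).dropLast,
                 p1 ++ [(st.getD '[' []).getLast hs], p2 ++ [i]) := by
              simp [dbpStepA, hop, hcl, hopener, hs]
            have hstB : dbpStepB (st, m) (i, ']') =
                (st.insert '[' (st.getD '[' []).dropLast,
                 m.insert ((st.getD '[' []).getLast hs) i) := by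
              simp [dbpStepB, hop, hcl, hopener, hs]
            rw [hstA, hstB]
            obtain ⟨h1, h2, h3, h4⟩ := pvInv_close st p1 p2 m bnd i '['
              (st.getD '(' []) (st.getD '{' [] ++ st.getD '<' [])
              (by simp [pvPool]) (fun l => by simp [pvPool, PySem.Dict.getD_insert]) hs
              hitems hlen hnd hbd hbi
            exact ih _ _ _ _ (i + 1) B hpw' hmem' (by omega) (by omega) h1 h2 h3 h4
        · have hopener : pvCloseToOpen.getD '}' '}' = '{' := by decide
          by_cases hs : st.getD '{' [] = []
          · have hstA : dbpStepA (st, p1, p2) (i, '}') = (st, p1, p2) := by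
              simp [dbpStepA, hop, hcl, hopener, hs]
            have hstB : dbpStepB (st, m) (i, '}') = (st, m) := by
              simp [dbpStepB, hop, hcl, hopener, hs]
            rw [hstA, hstB]
            exact ih st p1 p2 m (i + 1) B hpw' hmem' (by omega) (by omega) hitems hlen hnd
              (fun x hx => ⟨(hbd x hx).1, by have := (hbd x hx).2; omega⟩)
          · have hstA : dbpStepA (st, p1, p2) (i, '}') =
                (st.insert '{' (st.getD '{' []).dropLast,
                 p1 ++ [(st.getD '{' []).getLast hs], p2 ++ [i]) := by
              simp [dbpStepA, hop, hcl, hopener, hs]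
            have hstB : dbpStepB (st, m) (i, '}') =
                (st.insert '{' (st.getD '{' []).dropLast,
                 m.insert ((st.getD '{' []).getLast hs) i) := by
              simp [dbpStepB, hop, hcl, hopener, hs]
            rw [hstA, hstB]
            obtain ⟨h1, h2, h3, h4⟩ := pvInv_close st p1 p2 m bnd i '{'
              (st.getD '(' [] ++ st.getD '[' []) (st.getD '<' [])
              (by simp [pvPool]) (fun l => by simp [pvPool, PySem.Dict.getD_insert]) hs
              hitems hlen hnd hbd hbi
            exact ih _ _ _ _ (i + 1) B hpw' hmem' (by omega) (by omega) h1 h2 h3 h4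
        · have hopener : pvCloseToOpen.getD '>' '>' = '<' := by decide
          by_cases hs : st.getD '<' [] = []
          · have hstA : dbpStepA (st, p1, p2) (i, '>') = (st, p1, p2) := by
              simp [dbpStepA, hop, hcl, hopener, hs]
            have hstB : dbpStepB (st, m) (i, '>') = (st, m) := by
              simp [dbpStepB, hop, hcl, hopener, hs]
            rw [hstA, hstB]
            exact ih st p1 p2 m (i + 1) B hpw' hmem' (by omega) (by omega) hitems hlen hnd
              (fun x hx => ⟨(hbd x hx).1, by have := (hbd x hx).2; omega⟩)
          · have hstA : dbpStepA (st, p1, p2) (i, '>') =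
                (st.insert '<' (st.getD '<' []).dropLast,
                 p1 ++ [(st.getD '<' []).getLast hs], p2 ++ [i]) := by
              simp [dbpStepA, hop, hcl, hopener, hs]
            have hstB : dbpStepB (st, m) (i, '>') =
                (st.insert '<' (st.getD '<' []).dropLast,
                 m.insert ((st.getD '<' []).getLast hs) i) := by
              simp [dbpStepB, hop, hcl, hopener, hs]
            rw [hstA, hstB]
            obtain ⟨h1, h2, h3, h4⟩ := pvInv_close st p1 p2 m bnd i '<'
              (st.getD '(' [] ++ st.getD '[' [] ++ st.getD '{' []) (([] : List Int))
              (by simp [pvPool]) (fun l => by simp [pvPool, PySem.Dict.getD_insert]) hs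
              hitems hlen hnd hbd hbi
            exact ih _ _ _ _ (i + 1) B hpw' hmem' (by omega) (by omega) h1 h2 h3 h4
      · -- unpaired character
        have hstA : dbpStepA (st, p1, p2) (i, ch) = (st, p1, p2) := by simp [dbpStepA, hop, hcl]
        have hstB : dbpStepB (st, m) (i, ch) = (st, m) := by simp [dbpStepB, hop, hcl]
        rw [hstA, hstB]
        refine ih st p1 p2 m (i + 1) B hpw' hmem' (by omega) (by omega) hitems hlen hnd
          (fun x hx => ⟨(hbd x hx).1, by have := (hbd x hx).2; omega⟩)

theorem dbp_sweep (m : PySem.Dict Int Int) (n : Int) :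
    (PySem.List.pyRange 0 n).foldl
      (fun acc j => if m.contains j then (acc.1 ++ [j], acc.2 ++ [m.getD j 0]) else acc)
      ([], []) =
    ((PySem.List.pyRange 0 n).filter (fun j => m.contains j),
     ((PySem.List.pyRange 0 n).filter (fun j => m.contains j)).map (fun j => m.getD j 0)) := by
  rw [PySem.List.foldl_congr_mem _ _
    (fun acc j => (if m.contains j then acc.1 ++ [j] else acc.1,
                   if m.contains j then acc.2 ++ [m.getD j 0] else acc.2)) _
    (by intro acc x _; by_cases h : m.contains x <;> simp [h])]
  rw [PySem.List.foldl_prod_mk (f := fun acc j => if m.contains j then acc ++ [j] else acc)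
    (g := fun acc j => if m.contains j then acc ++ [m.getD j 0] else acc)]
  rw [PySem.List.foldl_append_if_eq_filter, PySem.List.foldl_append_if]
  simp

theorem insertBy_congr_mem {α : Type} (p q : α → α → Bool) (x : α) (ys : List α)
    (h : ∀ y ∈ ys, p x y = q x y) :
    PySem.List.insertBy p x ys = PySem.List.insertBy q x ys := by
  induction ys with
  | nil => rfl
  | cons y ys ih =>
    simp only [PySem.List.insertBy]
    rw [h y (List.mem_cons_self), ih (fun a ha => h a (List.mem_cons_of_mem _ ha))]

theorem foldl_insertBy_congr {α : Type} (p q : α → α → Bool) :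
    ∀ (xs acc : List α), (∀ x ∈ xs, ∀ a ∈ acc, p x a = q x a) →
    (∀ x ∈ xs, ∀ y ∈ xs, p x y = q x y) →
    xs.foldl (fun acc x => PySem.List.insertBy p x acc) acc =
      xs.foldl (fun acc x => PySem.List.insertBy q x acc) acc := by
  intro xs
  induction xs with
  | nil => intro acc _ _; rfl
  | cons x xs ih =>
    intro acc hacc hxs
    simp only [List.foldl_cons]
    rw [insertBy_congr_mem p q x acc (hacc x (List.mem_cons_self))]
    refine ih _ (fun z hz a ha => ?_) (fun z hz y hy =>
      hxs z (List.mem_cons_of_mem _ hz) y (List.mem_cons_of_mem _ hy))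
    rcases (PySem.List.mem_insertBy _ _ _ _).mp ha with rfl | hmem2
    · exact hxs z (List.mem_cons_of_mem _ hz) _ (List.mem_cons_self)
    · exact hacc z (List.mem_cons_of_mem _ hz) a hmem2

theorem sorted2_eq_sorted_fst (xs : List (Int × Int))
    (h : ∀ a ∈ xs, ∀ b ∈ xs, a.1 = b.1 → a = b) :
    PySem.List.sorted2 xs Prod.fst Prod.snd = PySem.List.sorted xs Prod.fst := by
  rw [PySem.List.sorted_eq_foldl_insertBy]
  show xs.foldl (fun acc x => PySem.List.insertBy
    (fun a b => decide (a.1 < b.1) || !decide (b.1 < a.1) && decide (a.2 < b.2)) x acc) [] = _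
  refine foldl_insertBy_congr _ _ xs [] (by simp) (fun a ha b hb => ?_)
  rcases lt_trichotomy a.1 b.1 with hlt | heq | hgt
  · simp [hlt, show ¬ b.1 < a.1 by omega]
  · rw [h a ha b hb heq]; simp
  · simp [hgt, show ¬ a.1 < b.1 by omega]

theorem dbp_eq (s : String) : dot_bracket_to_pairs s = dot_bracket_to_pairs_alt s := by
  have hinit : (PySem.Dict.empty : PySem.Dict Int Int).keys ++ pvPool pvInitStacks = ([] : List Int) := rfl
  obtain ⟨hitems, hlen, hnd, hbd⟩ :=
    dbp_scan (PySem.List.enumerate s.toList) pvInitStacks [] [] PySem.Dict.empty 0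
      (s.toList.length : Int)
      (PySem.List.pairwise_lt_enumerate _ _)
      (fun p hp => by
        have h1 : p.1 ∈ (PySem.List.enumerate s.toList 0).map (fun x => x.1) :=
          List.mem_map_of_mem hp
        rw [PySem.List.map_fst_enumerate] at h1
        have := PySem.List.mem_pyRange_one.mp h1
        omega)
      le_rfl (by positivity) rfl rfl (by rw [hinit]; exact List.nodup_nil)
      (by rw [hinit]; intro x hx; exact absurd hx (List.not_mem_nil))
  set rA := (PySem.List.enumerate s.toList).foldl dbpStepA (pvInitStacks, [], []) with hrA
  set rB := (PySem.List.enumerate s.toList).foldl dbpStepB (pvInitStacks, PySem.Dict.empty) with hrB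
  set p1 := rA.2.1
  set p2 := rA.2.2
  set m := rB.2 with hm
  set n := (s.toList.length : Int) with hn
  have hkeys : m.keys = p1 := by
    have h0 : m.keys = m.items.map Prod.fst := rfl
    rw [h0, hitems, List.map_fst_zip (le_of_eq hlen)]
  have hknd : m.keys.Nodup := (List.nodup_append.mp hnd).1
  have hbk : ∀ k ∈ m.keys, 0 ≤ k ∧ k < n := fun k hk => hbd k (List.mem_append_left _ hk)
  have hmemiff : ∀ j : Int, j ∈ (PySem.List.pyRange 0 n).filter (fun j => m.contains j) ↔
      j ∈ m.keys := by
    intro j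
    rw [List.mem_filter, PySem.List.mem_pyRange_one, PySem.Dict.contains_iff_mem_keys]
    constructor
    · exact fun h => h.2
    · exact fun h => ⟨⟨(hbk j h).1, (hbk j h).2⟩, h⟩
  have halt : dot_bracket_to_pairs_alt s =
      ((PySem.List.pyRange 0 n).filter (fun j => m.contains j),
       ((PySem.List.pyRange 0 n).filter (fun j => m.contains j)).map (fun j => m.getD j 0)) := by
    show (PySem.List.pyRange 0 (PySem.Str.len s)).foldl _ ([], []) = _
    rw [PySem.Str.len_eq, ← hn, ← hrB, ← hm]
    exact dbp_sweep m n
  by_cases hp1 : p1 = []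
  · have hks : (PySem.List.pyRange 0 n).filter (fun j => m.contains j) = [] := by
      rw [List.eq_nil_iff_forall_not_mem]
      intro j hj
      have := (hmemiff j).mp hj
      rw [hkeys, hp1] at this
      exact absurd this (List.not_mem_nil)
    have hp2 : p2 = [] := by
      have := hlen; rw [hp1] at this; exact List.eq_nil_of_length_eq_zero this.symm
    show (if p1 ≠ [] then _ else (p1, p2)) = _
    rw [if_neg (by simp [hp1]), halt, hks, hp1, hp2]
    rfl
  · set ks := (PySem.List.pyRange 0 n).filter (fun j => m.contains j) with hks
    set ys := ks.map (fun j => (j, m.getD j 0)) with hys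
    have hksnd : ks.Nodup := (PySem.List.nodup_pyRange_one 0 n).filter _
    have hperm : ks.Perm m.keys :=
      List.perm_of_nodup_nodup_toFinset_eq hksnd hknd
        (Finset.ext fun a => by simp only [List.mem_toFinset]; exact hmemiff a)
    have hitems2 : m.items = m.keys.map (fun k => (k, m.getD k 0)) :=
      PySem.Dict.items_eq_map_keys m hknd 0
    have heq : m.keys.map (fun k => (k, m.getD k 0)) = p1.zip p2 := by
      rw [← hitems2, hitems]
    have hpys : ys.Perm (p1.zip p2) := (hperm.map _).trans (heq ▸ List.Perm.refl _)
    have hpw : ys.Pairwise (fun a b : Int × Int => a.1 < b.1) :=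
      List.Pairwise.map _ (fun a b h => h)
        ((PySem.List.pairwise_lt_pyRange_one 0 n).filter _)
    have hinj : ∀ a ∈ p1.zip p2, ∀ b ∈ p1.zip p2, a.1 = b.1 → a = b := by
      have : ((p1.zip p2).map Prod.fst).Nodup := by
        rw [List.map_fst_zip (le_of_eq hlen)]
        exact hkeys ▸ hknd
      exact fun a ha b hb => List.inj_on_of_nodup_map this ha hb
    have hsort : PySem.List.sorted2 (p1.zip p2) Prod.fst Prod.snd = ys :=
      (sorted2_eq_sorted_fst _ hinj).trans
        (PySem.List.sorted_eq_of_perm_of_pairwise_lt _ ys Prod.fst hpys hpw)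
    show (if p1 ≠ [] then
        (((PySem.List.sorted2 (p1.zip p2) Prod.fst Prod.snd).map Prod.fst),
         ((PySem.List.sorted2 (p1.zip p2) Prod.fst Prod.snd).map Prod.snd)) else (p1, p2)) = _
    rw [if_pos (by simp [hp1]), halt, hsort, hys]
    simp [List.map_map, Function.comp_def]

-- ===== VERDICT (by name: the statement is the Claim_ definition above) =====
theorem dot_bracket_to_pairs_spec : Claim_equal_dot_bracket_to_pairs := by
  intro structure_ _
  exact dbp_eq structure_
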